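-- pv_equiv track=rewrite | github.com/ArnaudDeza/AI_for_Mathematics | src/rewards/conj_no_isoceles_triangle.py | count_duplicate_distances
-- ===== SOURCE A (Python) =====
-- def count_duplicate_distances(included_indices, positions):
--     """
--     Counts the number of duplicate distances among the included points.
--     """
--     distance_counts = {}
--     m = len(included_indices)
--     num_duplicates = 0
--     # Compute distances between all pairs
--     for i in range(m):
--         idx_a = included_indices[i]
--         x1, y1 = positions[idx_a]
--         for j in range(i + 1, m):
--             idx_b = included_indices[j]
--             x2, y2 = positions[idx_b]
--             dx = x2 - x1
--             dy = y2 - y1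
--             dist_sq = dx * dx + dy * dy
--             if dist_sq in distance_counts:
--                 distance_counts[dist_sq] += 1
--             else:
--                 distance_counts[dist_sq] = 1
--     # Count duplicate distances
--     for count in distance_counts.values():
--         if count > 1:
--             num_duplicates += count - 1
--     return num_duplicates
-- ===== SOURCE B (Python) =====
-- def _pair_dists(pts):
--     if not pts:
--         return []
--     (x1, y1), rest = pts[0], pts[1:]
--     return [(x2 - x1) ** 2 + (y2 - y1) ** 2 for (x2, y2) in rest] + _pair_dists(rest)
--
--
-- def count_duplicate_distances(included_indices, positions):
--     """
--     Counts the number of duplicate distances among the included points.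
--
--     Collects the distinct squared distances into a set; the number of
--     duplicates is then total_pairs - num_distinct by the identity
--     sum(count - 1) = total_entries - num_distinct.
--     """
--     pts = [positions[i] for i in included_indices]
--     m = len(pts)
--     return m * (m - 1) // 2 - len(set(_pair_dists(pts)))
-- ===== Notes on version B (the rewrite author's own statement) =====
-- stated objective: simpler
-- what changed: Replaces the per-distance count dictionary and the second pass over its values with a recursively built list of pairwise squared distances whose distinct values go into a set, returning the closed form m*(m-1)//2 - len(set) via the identity sum(count-1) = total_pairs - num_distinct.
import Mathlib
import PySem

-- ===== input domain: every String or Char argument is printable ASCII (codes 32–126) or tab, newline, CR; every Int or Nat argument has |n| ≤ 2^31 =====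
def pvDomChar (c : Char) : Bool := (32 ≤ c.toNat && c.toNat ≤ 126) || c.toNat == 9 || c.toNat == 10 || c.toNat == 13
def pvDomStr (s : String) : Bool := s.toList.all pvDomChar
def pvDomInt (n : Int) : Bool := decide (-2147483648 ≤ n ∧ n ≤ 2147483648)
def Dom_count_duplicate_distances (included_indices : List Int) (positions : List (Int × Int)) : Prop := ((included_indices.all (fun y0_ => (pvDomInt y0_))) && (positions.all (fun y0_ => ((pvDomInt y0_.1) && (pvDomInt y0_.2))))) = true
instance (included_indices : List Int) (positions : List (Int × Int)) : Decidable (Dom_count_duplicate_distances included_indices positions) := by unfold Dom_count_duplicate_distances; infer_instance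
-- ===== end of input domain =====

-- B replaces A's per-distance count dictionary and its second pass over the values by a
-- set of distinct squared distances and the closed form m*(m-1)//2 - len(set) (objective: simpler).

-- ===== PORT A =====
def count_duplicate_distances (included_indices : List Int) (positions : List (Int × Int)) : Int :=
  let m : Int := included_indices.length
  let distance_counts : PySem.Dict Int Int :=
    (PySem.List.pyRange 0 m 1).foldl (fun d i =>
      let idx_a := PySem.List.pyGetD included_indices i 0
      -- positions[idx_a]: Pre_ excludes out-of-range indices (Python IndexError)
      let pa := PySem.List.pyGetD positions idx_a (0, 0)
      (PySem.List.pyRange (i + 1) m 1).foldl (fun d j =>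
        let idx_b := PySem.List.pyGetD included_indices j 0
        let pb := PySem.List.pyGetD positions idx_b (0, 0)
        let dx := pb.1 - pa.1
        let dy := pb.2 - pa.2
        let dist_sq := dx * dx + dy * dy
        if d.contains dist_sq then d.insert dist_sq (d.getD dist_sq 0 + 1)
        else d.insert dist_sq 1) d) PySem.Dict.empty
  distance_counts.values.foldl (fun num_duplicates count =>
    if count > 1 then num_duplicates + (count - 1) else num_duplicates) 0

-- ===== PORT B =====
def pairDists : List (Int × Int) → List Int
  | [] => []
  | (x1, y1) :: rest =>
      rest.map (fun p => (p.1 - x1) ^ 2 + (p.2 - y1) ^ 2) ++ pairDists rest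

def count_duplicate_distances_alt (included_indices : List Int) (positions : List (Int × Int)) : Int :=
  -- positions[i]: Pre_ excludes out-of-range indices (Python IndexError)
  let pts := included_indices.map (fun i => PySem.List.pyGetD positions i (0, 0))
  let m : Int := pts.length
  PySem.Int.floordiv (m * (m - 1)) 2 - ((PySem.Set.ofList (pairDists pts)).length : Int)

-- ===== PRECONDITION & SPEC =====
-- Pre_ excludes exactly the inputs on which Python A raises IndexError: some included
-- index out of range for positions (A and B both index positions by every included index).
def Pre_count_duplicate_distances (included_indices : List Int) (positions : List (Int × Int)) : Prop :=
  ∀ i ∈ included_indices, PySem.Raise.InRange positions.length i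
instance (included_indices : List Int) (positions : List (Int × Int)) : Decidable (Pre_count_duplicate_distances included_indices positions) := by unfold Pre_count_duplicate_distances; infer_instance
def pvWitness_count_duplicate_distances : List Int × (List (Int × Int)) :=
  ([0, 1, -1], [(0, 0), (1, 0), (0, 1)])
def Spec_count_duplicate_distances (included_indices : List Int) (positions : List (Int × Int)) (out : Int) : Prop := out = count_duplicate_distances_alt included_indices positions
instance (included_indices : List Int) (positions : List (Int × Int)) (out : Int) : Decidable (Spec_count_duplicate_distances included_indices positions out) := by unfold Spec_count_duplicate_distances; infer_instance

-- ===== CLAIM (what is proved, stated in full; the proofs are below) =====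
def Claim_equal_count_duplicate_distances : Prop := ∀ (included_indices : List Int) (positions : List (Int × Int)), Dom_count_duplicate_distances included_indices positions → Pre_count_duplicate_distances included_indices positions → Spec_count_duplicate_distances included_indices positions (count_duplicate_distances included_indices positions)

-- ===== LEMMAS AND PROOFS =====

-- the list of pairwise values for an arbitrary pair function (proof helper)
def pairsOf (f : (Int × Int) → (Int × Int) → Int) : List (Int × Int) → List Int
  | [] => []
  | p :: rest => rest.map (f p) ++ pairsOf f rest

-- A's if/else counting step is Dict.modify
theorem stepA_eq_modify (d : PySem.Dict Int Int) (x : Int) :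
    (if d.contains x then d.insert x (d.getD x 0 + 1) else d.insert x 1)
      = d.modify x 0 (· + 1) := by
  unfold PySem.Dict.modify
  by_cases h : d.contains x
  · simp [h]
  · have : d.get? x = none := by
      rw [PySem.Dict.get?_eq_none_iff_contains]; simpa using h
    simp [h, PySem.Dict.getD, this]

-- the double index loop over all pairs is a single fold over pairsOf
theorem loop_eq_pairsOf {β : Type} (f : (Int × Int) → (Int × Int) → Int)
    (step : β → Int → β) :
    ∀ (pts : List (Int × Int)) (d : β),
    (PySem.List.pyRange 0 (pts.length : Int) 1).foldl (fun d i =>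
      (PySem.List.pyRange (i + 1) (pts.length : Int) 1).foldl (fun d j =>
        step d (f (PySem.List.pyGetD pts i (0, 0)) (PySem.List.pyGetD pts j (0, 0)))) d) d
      = (pairsOf f pts).foldl step d := by
  intro pts
  induction pts with
  | nil => intro d; simp [pairsOf, PySem.List.pyRange_one_eq_nil]
  | cons p rest ih =>
      intro d
      have hlen : ((p :: rest).length : Int) = (rest.length : Int) + 1 := by
        push_cast [List.length_cons]; ring
      rw [PySem.List.pyRange_one_cons (by rw [hlen]; positivity)]
      rw [List.foldl_cons]
      -- first iteration: i = 0
      have h0 : (PySem.List.pyRange (0 + 1) ((p :: rest).length : Int) 1).foldl (fun d j =>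
          step d (f (PySem.List.pyGetD (p :: rest) 0 (0, 0)) (PySem.List.pyGetD (p :: rest) j (0, 0)))) d
          = (rest.map (f p)).foldl step d := by
        rw [PySem.List.foldl_pyRange_pyGetD' (p :: rest) (0, 0)
              (fun acc q => step acc (f (PySem.List.pyGetD (p :: rest) 0 (0, 0)) q)) d (by norm_num)]
        simp [List.foldl_map, PySem.List.pyGetD_zero_cons]
      rw [zero_add] at h0 ⊢
      rw [h0]
      -- remaining iterations: i = 1 .. n over p :: rest  =  i = 0 .. n-1 over rest
      have hrest : ∀ d' : β,
          (PySem.List.pyRange 1 ((p :: rest).length : Int) 1).foldl (fun d i =>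
            (PySem.List.pyRange (i + 1) ((p :: rest).length : Int) 1).foldl (fun d j =>
              step d (f (PySem.List.pyGetD (p :: rest) i (0, 0)) (PySem.List.pyGetD (p :: rest) j (0, 0)))) d) d'
          = (pairsOf f rest).foldl step d' := by
        intro d'
        rw [← ih d']
        rw [PySem.List.pyRange_one 1, PySem.List.pyRange_one 0, hlen]
        have hn1 : ((rest.length : Int) + 1 - 1).toNat = rest.length := by omega
        have hn0 : ((rest.length : Int) - 0).toNat = rest.length := by omega
        rw [hn1, hn0, List.foldl_map, List.foldl_map]
        apply PySem.List.foldl_congr_mem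
        intro acc k _
        -- both inner folds are folds over rest.drop (k+1)
        have hL : (PySem.List.pyRange (1 + (k : Int) + 1) ((rest.length : Int) + 1) 1).foldl (fun d j =>
            step d (f (PySem.List.pyGetD (p :: rest) (1 + (k : Int)) (0, 0)) (PySem.List.pyGetD (p :: rest) j (0, 0)))) acc
            = (rest.drop (k + 1)).foldl (fun acc q => step acc (f (PySem.List.pyGetD (p :: rest) (1 + (k : Int)) (0, 0)) q)) acc := by
          rw [← hlen]
          rw [PySem.List.foldl_pyRange_pyGetD' (p :: rest) (0, 0)
                (fun acc q => step acc (f (PySem.List.pyGetD (p :: rest) (1 + (k : Int)) (0, 0)) q)) acc (by omega)]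
          have : ((1 : Int) + (k : Int) + 1).toNat = k + 2 := by omega
          rw [this]
          rfl
        have hR : (PySem.List.pyRange (0 + (k : Int) + 1) (rest.length : Int) 1).foldl (fun d j =>
            step d (f (PySem.List.pyGetD rest (0 + (k : Int)) (0, 0)) (PySem.List.pyGetD rest j (0, 0)))) acc
            = (rest.drop (k + 1)).foldl (fun acc q => step acc (f (PySem.List.pyGetD rest (0 + (k : Int)) (0, 0)) q)) acc := by
          rw [PySem.List.foldl_pyRange_pyGetD' rest (0, 0)
                (fun acc q => step acc (f (PySem.List.pyGetD rest (0 + (k : Int)) (0, 0)) q)) acc (by omega)]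
          have : ((0 : Int) + (k : Int) + 1).toNat = k + 1 := by omega
          rw [this]
        rw [hL, hR]
        have hget : PySem.List.pyGetD (p :: rest) (1 + (k : Int)) (0, 0) = PySem.List.pyGetD rest (0 + (k : Int)) (0, 0) := by
          have h1 : (1 : Int) + (k : Int) = ((k + 1 : Nat) : Int) := by omega
          have h2 : (0 : Int) + (k : Int) = ((k : Nat) : Int) := by omega
          rw [h1, h2, PySem.List.pyGetD_natCast, PySem.List.pyGetD_natCast]
          simp
        rw [hget]
      rw [hrest]
      simp [pairsOf, List.foldl_append]

-- pairDists is pairsOf with the squared-distance function written with *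
theorem pairDists_eq (pts : List (Int × Int)) :
    pairDists pts = pairsOf (fun a b => (b.1 - a.1) * (b.1 - a.1) + (b.2 - a.2) * (b.2 - a.2)) pts := by
  induction pts with
  | nil => rfl
  | cons p rest ih =>
      obtain ⟨x1, y1⟩ := p
      simp only [pairDists, pairsOf, ih]
      congr 1
      exact List.map_congr_left (fun q _ => by ring)

-- composing the two indexings: positions[included_indices[i]] is pts[i]
theorem pyGetD_comp (inc : List Int) (pos : List (Int × Int)) (i : Int)
    (h0 : 0 ≤ i) (h1 : i < (inc.length : Int)) :
    PySem.List.pyGetD pos (PySem.List.pyGetD inc i 0) (0, 0)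
      = PySem.List.pyGetD (inc.map (fun idx => PySem.List.pyGetD pos idx (0, 0))) i (0, 0) := by
  rw [PySem.List.pyGetD_eq_getElem inc 0 h0 h1,
      PySem.List.pyGetD_eq_getElem _ (0, 0) h0 (by simpa using h1)]
  simp

-- sum of the multiplicities over the distinct elements is the length
theorem sum_count_ofList (L : List Int) :
    ((PySem.Set.ofList L).map (fun k => (L.count k : Int))).sum = (L.length : Int) := by
  have hperm : (PySem.List.dedup L).Perm L.dedup := by
    rw [List.perm_ext_iff_of_nodup (PySem.List.nodup_dedup L) L.nodup_dedup]
    intro a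
    rw [PySem.List.mem_dedup, List.mem_dedup]
  have hnat : ((PySem.List.dedup L).map (fun k => L.count k)).sum = L.length := by
    rw [(hperm.map (fun k => L.count k)).sum_eq]
    simpa using List.sum_map_count_dedup_eq_length L
  rw [← PySem.List.dedup_eq_ofList]
  calc ((PySem.List.dedup L).map (fun k => (L.count k : Int))).sum
      = ((((PySem.List.dedup L).map (fun k => L.count k)).sum : Nat) : Int) := by
        rw [Nat.cast_list_sum, List.map_map]; rfl
    _ = (L.length : Int) := by rw [hnat]

-- twice the length of the pair list is m*(m-1)
theorem length_pairsOf (f : (Int × Int) → (Int × Int) → Int) (pts : List (Int × Int)) :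
    2 * ((pairsOf f pts).length : Int) = (pts.length : Int) * ((pts.length : Int) - 1) := by
  induction pts with
  | nil => simp [pairsOf]
  | cons p rest ih =>
      simp only [pairsOf, List.length_append, List.length_map, List.length_cons]
      push_cast
      push_cast at ih
      linear_combination ih

-- ===== VERDICT (by name: the statement is the Claim_ definition above) =====
theorem count_duplicate_distances_spec : Claim_equal_count_duplicate_distances := by
  intro inc pos _ _
  unfold Spec_count_duplicate_distances count_duplicate_distances count_duplicate_distances_alt
  simp only []
  set pts := inc.map (fun idx => PySem.List.pyGetD pos idx (0, 0)) with hpts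
  set fmul : (Int × Int) → (Int × Int) → Int :=
    fun a b => (b.1 - a.1) * (b.1 - a.1) + (b.2 - a.2) * (b.2 - a.2) with hfmul
  set L := pairsOf fmul pts with hL
  have hlen : (inc.length : Int) = (pts.length : Int) := by simp [hpts]
  -- Step 1: A's dictionary is counter L
  have hdict :
      (PySem.List.pyRange 0 (inc.length : Int) 1).foldl (fun d i =>
        (PySem.List.pyRange (i + 1) (inc.length : Int) 1).foldl (fun d j =>
          let dist_sq := fmul (PySem.List.pyGetD pos (PySem.List.pyGetD inc i 0) (0, 0))
                              (PySem.List.pyGetD pos (PySem.List.pyGetD inc j 0) (0, 0))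
          if d.contains dist_sq then d.insert dist_sq (d.getD dist_sq 0 + 1)
          else d.insert dist_sq 1) d) PySem.Dict.empty
      = PySem.Dict.counter L := by
    rw [hlen]
    have hcongr := PySem.List.foldl_congr_mem (PySem.List.pyRange 0 ((pts.length : Int)) 1)
      (fun (d : PySem.Dict Int Int) i =>
        (PySem.List.pyRange (i + 1) (pts.length : Int) 1).foldl (fun d j =>
          let dist_sq := fmul (PySem.List.pyGetD pos (PySem.List.pyGetD inc i 0) (0, 0))
                              (PySem.List.pyGetD pos (PySem.List.pyGetD inc j 0) (0, 0))
          if d.contains dist_sq then d.insert dist_sq (d.getD dist_sq 0 + 1)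
          else d.insert dist_sq 1) d)
      (fun (d : PySem.Dict Int Int) i =>
        (PySem.List.pyRange (i + 1) (pts.length : Int) 1).foldl (fun d j =>
          (fun d x => if PySem.Dict.contains d x then d.insert x (d.getD x 0 + 1)
            else d.insert x 1) d (fmul (PySem.List.pyGetD pts i (0, 0)) (PySem.List.pyGetD pts j (0, 0)))) d)
      PySem.Dict.empty ?_
    · rw [hcongr, loop_eq_pairsOf fmul
        (fun d x => if PySem.Dict.contains d x then d.insert x (d.getD x 0 + 1) else d.insert x 1) pts,
        ← hL, PySem.Dict.counter_eq_foldl]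
      exact PySem.List.foldl_congr_mem L _ _ _ (fun acc x _ => stepA_eq_modify acc x)
    · intro acc i hi
      obtain ⟨hi0, hi1⟩ := PySem.List.mem_pyRange_one.mp hi
      apply PySem.List.foldl_congr_mem
      intro d j hj
      obtain ⟨hj0, hj1⟩ := PySem.List.mem_pyRange_one.mp hj
      simp only []
      rw [pyGetD_comp inc pos i hi0 (by rw [hlen]; exact hi1),
          pyGetD_comp inc pos j (by omega) (by rw [hlen]; exact hj1)]
  rw [hdict]
  -- Step 2: the second pass sums count-1 over the distinct distances
  have hvals : (PySem.Dict.counter L).values = (PySem.Set.ofList L).map (fun k => (L.count k : Int)) := by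
    show (PySem.Dict.counter L).items.map (·.2) = _
    rw [PySem.Dict.items_counter, List.map_map]
    rfl
  rw [hvals, List.foldl_map]
  have hbody := PySem.List.foldl_congr_mem (PySem.Set.ofList L)
    (fun (a : Int) k => if (L.count k : Int) > 1 then a + ((L.count k : Int) - 1) else a)
    (fun (a : Int) k => a + ((L.count k : Int) - 1)) 0 ?_
  · rw [hbody, PySem.List.foldl_add]
    have hsplit : (PySem.Set.ofList L).map (fun k => (L.count k : Int) - 1)
        = (PySem.Set.ofList L).map (fun k => (L.count k : Int) + (-1)) := by
      exact List.map_congr_left (fun k _ => by ring)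
    rw [hsplit, PySem.List.sum_map_add_int, sum_count_ofList, PySem.List.sum_map_const_int]
    -- Step 3: B's closed form
    have h2L := length_pairsOf fmul pts
    rw [← hL] at h2L
    have hfd : PySem.Int.floordiv ((pts.length : Int) * ((pts.length : Int) - 1)) 2 = (L.length : Int) := by
      rw [PySem.Int.floordiv_eq_ediv_of_pos (by norm_num), ← h2L]
      exact Int.mul_ediv_cancel_left _ (by norm_num)
    rw [hfd]
    have hset : pairDists pts = L := by rw [hL, hfmul]; exact pairDists_eq pts
    rw [hset]
    ring
  · intro a k hk
    have hkL : k ∈ L := (PySem.Set.mem_ofList L k).mp hk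
    have hc : 1 ≤ L.count k := List.count_pos_iff.mpr hkL
    by_cases h : (L.count k : Int) > 1
    · simp [h]
    · have : (L.count k : Int) = 1 := by omega
      simp [this]
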